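-- pv_equiv track=rewrite | github.com/sancau/ivelum_test_task | src/transformer.py | _transform_word
-- ===== SOURCE A (Python) =====
-- def _transform_word(word: str) -> str:
--     """
--     Transforms a series of symbols that can be considered as a word
--
--     Examples of words: 'word', 'word25', 'some-word25', etc
--
--     Note: tokens like 'some@word' considered as 2 words - 'some' and 'word'
--           as '-' and '_' is the only allowed inner delimiters
--
--     :param word: word as string
--     :return: transformed word as string
--     """
--     out = ''
--     counter = 0
--     for c in word:
--         if c.isalpha() or c in ['-', '_']:
--             counter += 1
--         else:
--             if counter == 6:
--                 out += '\u2122'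
--             counter = 0
--         out += c
--     if counter == 6:
--         out += '\u2122'
--     return ''.join(out)
-- ===== SOURCE B (Python) =====
-- def _transform_word(word: str) -> str:
--     """Run-based re-implementation: split into maximal runs of word/non-word
--     characters and mark word-runs of exactly six characters."""
--     def is_w(c):
--         return c.isalpha() or c in ('-', '_')
--
--     parts = []
--     i, n = 0, len(word)
--     while i < n:
--         k = is_w(word[i])
--         j = i
--         while j < n and is_w(word[j]) == k:
--             j += 1
--         seg = word[i:j]
--         if k and j - i == 6:
--             seg += '\u2122'
--         parts.append(seg)
--         i = j
--     return ''.join(parts)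
-- ===== Notes on version B (the rewrite author's own statement) =====
-- stated objective: alternative
-- what changed: Replaced A's per-character loop with a running counter and incremental string += by a run-splitting scan: the word is cut into maximal runs of word/non-word characters, six-character word-runs get the trademark mark appended, and the segments are joined once.
import Mathlib
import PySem

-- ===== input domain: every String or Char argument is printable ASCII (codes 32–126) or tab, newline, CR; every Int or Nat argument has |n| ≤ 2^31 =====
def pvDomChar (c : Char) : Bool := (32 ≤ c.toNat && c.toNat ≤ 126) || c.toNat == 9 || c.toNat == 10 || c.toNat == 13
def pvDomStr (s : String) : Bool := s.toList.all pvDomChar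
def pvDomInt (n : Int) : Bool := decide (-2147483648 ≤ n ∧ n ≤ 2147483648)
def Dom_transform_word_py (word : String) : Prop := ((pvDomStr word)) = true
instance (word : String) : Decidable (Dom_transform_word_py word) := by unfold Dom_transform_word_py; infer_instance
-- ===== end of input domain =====

-- B replaces A's per-character counter loop by splitting the word into maximal
-- runs and marking six-character word-runs; objective: idiomatic/alternative, same cost.

-- word-character test shared by both Pythons: c.isalpha() or c in ('-','_')
-- (exact on the ASCII domain, where Python's isalpha = Char.isAlpha)
def pvIsW (c : Char) : Bool := c.isAlpha || c == '-' || c == '_'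

def pvTM : Char := '\u2122'

-- ===== PORT A =====
-- A's for-loop over the characters, state (out, counter)
def transform_word_py_loop : List Char → List Char → Nat → List Char
  | [], out, counter => if counter = 6 then out ++ [pvTM] else out
  | c :: cs, out, counter =>
    if pvIsW c then
      transform_word_py_loop cs (out ++ [c]) (counter + 1)
    else
      transform_word_py_loop cs ((if counter = 6 then out ++ [pvTM] else out) ++ [c]) 0

def transform_word_py (word : String) : String :=
  String.ofList (transform_word_py_loop word.toList [] 0)

-- ===== PORT B =====
-- B's outer while-loop: split into maximal runs of equal word-ness
def transform_word_py_alt_runs : List Char → List (Bool × List Char)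
  | [] => []
  | c :: cs =>
    (pvIsW c, c :: cs.takeWhile (fun d => pvIsW d == pvIsW c))
      :: transform_word_py_alt_runs (cs.dropWhile (fun d => pvIsW d == pvIsW c))
termination_by l => l.length
decreasing_by
  simp only [List.length_cons]
  exact Nat.lt_succ_of_le (List.length_dropWhile_le _ _)

-- per-run segment: mark word-runs of length exactly 6
def pvSeg (g : Bool × List Char) : List Char :=
  if g.1 && g.2.length == 6 then g.2 ++ [pvTM] else g.2

def transform_word_py_alt (word : String) : String :=
  String.ofList (((transform_word_py_alt_runs word.toList).map pvSeg).flatten)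

-- ===== PRECONDITION & SPEC =====
def Spec_transform_word_py (word : String) (out : String) : Prop := out = transform_word_py_alt word
instance (word : String) (out : String) : Decidable (Spec_transform_word_py word out) := by unfold Spec_transform_word_py; infer_instance

-- ===== CLAIM (what is proved, stated in full; the proofs are below) =====
def Claim_equal_transform_word_py : Prop := ∀ (word : String), Dom_transform_word_py word → Spec_transform_word_py word (transform_word_py word)

-- ===== LEMMAS AND PROOFS =====

-- A's remaining output when the pending run so far has length `counter`
def pvTail : Nat → List Char → List Char
  | counter, [] => if counter = 6 then [pvTM] else []
  | counter, c :: cs =>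
    if pvIsW c then c :: pvTail (counter + 1) cs
    else (if counter = 6 then [pvTM] else []) ++ c :: pvTail 0 cs

theorem pvLoop_eq_tail (l : List Char) : ∀ (out : List Char) (counter : Nat),
    transform_word_py_loop l out counter = out ++ pvTail counter l := by
  induction l with
  | nil =>
    intro out counter
    simp only [transform_word_py_loop, pvTail]
    split_ifs <;> simp
  | cons c cs ih =>
    intro out counter
    simp only [transform_word_py_loop, pvTail]
    by_cases h : pvIsW c = true
    · simp [h, ih]
    · simp only [h, ih]
      split_ifs <;> simp

theorem pvTail_word_run : ∀ (run : List Char) (k : Nat) (rest : List Char),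
    (∀ c ∈ run, pvIsW c = true) →
    pvTail k (run ++ rest) = run ++ pvTail (k + run.length) rest := by
  intro run
  induction run with
  | nil => intro k rest _; simp
  | cons c t ih =>
    intro k rest h
    have hc : pvIsW c = true := h c (by simp)
    simp only [List.cons_append, pvTail, hc, if_true]
    rw [ih (k + 1) rest (fun d hd => h d (by simp [hd]))]
    have h2 : k + 1 + t.length = k + (t.length + 1) := by omega
    simp [h2]

theorem pvTail_nonword_run : ∀ (run : List Char) (rest : List Char),
    (∀ c ∈ run, pvIsW c = false) →
    pvTail 0 (run ++ rest) = run ++ pvTail 0 rest := by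
  intro run
  induction run with
  | nil => intro rest _; simp
  | cons c t ih =>
    intro rest h
    have hc : pvIsW c = false := h c (by simp)
    simp only [List.cons_append, pvTail, hc]
    simp only [Bool.false_eq_true, if_false]
    rw [ih rest (fun d hd => h d (by simp [hd]))]
    simp

theorem pvDropWhile_head (p : Char → Bool) : ∀ (l : List Char),
    ∀ d ds, l.dropWhile p = d :: ds → p d = false := by
  intro l
  induction l with
  | nil => intro d ds h; simp [List.dropWhile] at h
  | cons c t ih =>
    intro d ds h
    by_cases hc : p c = true
    · rw [List.dropWhile_cons_of_pos hc] at h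
      exact ih d ds h
    · rw [List.dropWhile_cons_of_neg hc] at h
      cases h
      simpa using hc

theorem pvTail_eq_runs : ∀ (n : Nat) (l : List Char), l.length ≤ n →
    pvTail 0 l = ((transform_word_py_alt_runs l).map pvSeg).flatten := by
  intro n
  induction n with
  | zero =>
    intro l hl
    have : l = [] := List.eq_nil_of_length_eq_zero (Nat.le_zero.mp hl)
    subst this
    rw [transform_word_py_alt_runs]
    simp [pvTail]
  | succ n ih =>
    intro l hl
    match l with
    | [] =>
      rw [transform_word_py_alt_runs]
      simp [pvTail]
    | c :: cs =>
      set p := fun d => pvIsW d == pvIsW c with hp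
      have hsplit : cs = cs.takeWhile p ++ cs.dropWhile p := (List.takeWhile_append_dropWhile).symm
      have hlen : (cs.dropWhile p).length ≤ n := by
        have := List.length_dropWhile_le p cs
        simp only [List.length_cons] at hl
        omega
      have hrec := ih (cs.dropWhile p) hlen
      have htake : ∀ d ∈ cs.takeWhile p, pvIsW d = pvIsW c := by
        intro d hd
        have := List.mem_takeWhile_imp hd
        simpa [hp] using this
      simp only [transform_word_py_alt_runs, List.map_cons, List.flatten_cons, ← hp]
      by_cases hw : pvIsW c = true
      · -- word run
        have hall : ∀ d ∈ (c :: cs.takeWhile p), pvIsW d = true := by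
          intro d hd
          rcases List.mem_cons.mp hd with h | h
          · subst h; exact hw
          · rw [htake d h]; exact hw
        have h1 : pvTail 0 (c :: cs) =
            (c :: cs.takeWhile p) ++ pvTail (c :: cs.takeWhile p).length (cs.dropWhile p) := by
          conv_lhs => rw [show c :: cs = (c :: cs.takeWhile p) ++ cs.dropWhile p by
            rw [List.cons_append, ← hsplit]]
          rw [pvTail_word_run _ 0 _ hall]
          simp
        have h2 : pvTail (c :: cs.takeWhile p).length (cs.dropWhile p) =
            (if (c :: cs.takeWhile p).length = 6 then [pvTM] else []) ++ pvTail 0 (cs.dropWhile p) := by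
          match hdw : cs.dropWhile p with
          | [] => simp [pvTail]
          | d :: ds =>
            have hd : p d = false := pvDropWhile_head p cs d ds hdw
            have hdw' : pvIsW d = false := by
              simp only [hp] at hd
              simp only [hw] at hd
              simpa using hd
            simp [pvTail, hdw']
        rw [h1, h2, hrec]
        simp only [pvSeg, hw, Bool.true_and]
        by_cases h6 : (c :: cs.takeWhile p).length = 6
        · have h5 : (cs.takeWhile p).length = 5 := by
            simp only [List.length_cons] at h6; omega
          simp [h6]
        · have h5 : (cs.takeWhile p).length ≠ 5 := by
            simp only [List.length_cons] at h6; omega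
          simp [h5]
      · -- non-word run
        have hw' : pvIsW c = false := by simpa using hw
        have hall : ∀ d ∈ (c :: cs.takeWhile p), pvIsW d = false := by
          intro d hd
          rcases List.mem_cons.mp hd with h | h
          · subst h; exact hw'
          · rw [htake d h]; exact hw'
        have h1 : pvTail 0 (c :: cs) =
            (c :: cs.takeWhile p) ++ pvTail 0 (cs.dropWhile p) := by
          conv_lhs => rw [show c :: cs = (c :: cs.takeWhile p) ++ cs.dropWhile p by
            rw [List.cons_append, ← hsplit]]
          exact pvTail_nonword_run _ _ hall
        rw [h1, hrec]
        simp [pvSeg, hw']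

-- ===== VERDICT (by name: the statement is the Claim_ definition above) =====
theorem transform_word_py_spec : Claim_equal_transform_word_py := by
  intro word _
  unfold Spec_transform_word_py transform_word_py transform_word_py_alt
  rw [pvLoop_eq_tail, pvTail_eq_runs word.toList.length word.toList le_rfl]
  simp
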